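-- pv_equiv track=rewrite | github.com/KiranPT03/Automator | Agent/browser_control.py | normalize_playwright_code
-- ===== SOURCE A (Python) =====
-- def normalize_playwright_code(code):
--     """Convert common method naming variations to correct Playwright syntax"""
--     replacements = {
--         'getByRole': 'get_by_role',
--         'getByText': 'get_by_text',
--         'getByLabel': 'get_by_label',
--         'getByPlaceholder': 'get_by_placeholder',
--         'getByTestId': 'get_by_test_id',
--         'click()': 'click()',
--         'type(': 'fill('
--     }
--
--     for old, new in replacements.items():
--         code = code.replace(old, new)
--     return code
-- ===== SOURCE B (Python) =====
-- def normalize_playwright_code(code):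
--     """Convert common method naming variations to correct Playwright syntax"""
--     rules = [
--         ('getByRole', 'get_by_role'),
--         ('getByText', 'get_by_text'),
--         ('getByLabel', 'get_by_label'),
--         ('getByPlaceholder', 'get_by_placeholder'),
--         ('getByTestId', 'get_by_test_id'),
--         ('type(', 'fill('),
--     ]
--     out = []
--     i = 0
--     n = len(code)
--     while i < n:
--         for old, new in rules:
--             if code.startswith(old, i):
--                 out.append(new)
--                 i += len(old)
--                 break
--         else:
--             out.append(code[i])
--             i += 1
--     return ''.join(out)
-- ===== Notes on version B (the rewrite author's own statement) =====
-- stated objective: alternative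
-- what changed: A runs seven sequential full-string str.replace passes (one per mapping entry); B makes ONE left-to-right scan over the string with a first-match rule table (dropping the no-op click() entry), emitting the replacement and skipping the matched pattern at each position.
-- outside the precondition, e.g. on normalize_playwright_code('getByTextype('): A returns 'get_by_texfill(', B returns 'get_by_textype('
import Mathlib
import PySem

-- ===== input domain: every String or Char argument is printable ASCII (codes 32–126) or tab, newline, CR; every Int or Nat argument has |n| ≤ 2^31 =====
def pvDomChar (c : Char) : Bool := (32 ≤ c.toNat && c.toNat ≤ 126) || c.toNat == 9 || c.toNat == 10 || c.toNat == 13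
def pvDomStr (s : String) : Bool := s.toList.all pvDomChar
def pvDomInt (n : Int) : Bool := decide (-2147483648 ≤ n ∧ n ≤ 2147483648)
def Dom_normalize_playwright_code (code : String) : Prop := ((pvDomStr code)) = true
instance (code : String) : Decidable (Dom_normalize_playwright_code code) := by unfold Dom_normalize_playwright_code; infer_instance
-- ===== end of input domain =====

-- B replaces A's seven sequential full-string str.replace passes by a single left-to-right
-- scan driven by a first-match rule table (objective: alternative; same results on Pre_).

-- ===== PORT A =====
-- A: seven chained str.replace passes, in the dict's insertion order.
def normalize_playwright_code (code : String) : String :=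
  let c1 := PySem.Str.replace code "getByRole" "get_by_role"
  let c2 := PySem.Str.replace c1 "getByText" "get_by_text"
  let c3 := PySem.Str.replace c2 "getByLabel" "get_by_label"
  let c4 := PySem.Str.replace c3 "getByPlaceholder" "get_by_placeholder"
  let c5 := PySem.Str.replace c4 "getByTestId" "get_by_test_id"
  let c6 := PySem.Str.replace c5 "click()" "click()"
  PySem.Str.replace c6 "type(" "fill("

-- ===== PORT B =====
-- B: a rule table and ONE left-to-right scan; at each position the first rule whose
-- pattern starts there is applied (the no-op 'click()'→'click()' rule is dropped).
def pvRules : List (List Char × List Char) :=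
  [ ("getByRole".toList, "get_by_role".toList)
  , ("getByText".toList, "get_by_text".toList)
  , ("getByLabel".toList, "get_by_label".toList)
  , ("getByPlaceholder".toList, "get_by_placeholder".toList)
  , ("getByTestId".toList, "get_by_test_id".toList)
  , ("type(".toList, "fill(".toList) ]

-- the inner `for old, new in rules: if code.startswith(old, i)` loop of Source B
def pvMatch (l : List Char) : Option (List Char × List Char) :=
  pvRules.findSome? (fun r => if r.1.isPrefixOf l then some (r.2, l.drop r.1.length) else none)

theorem pvMatch_some {l rep rest : List Char} (h : pvMatch l = some (rep, rest)) :
    ∃ pr ∈ pvRules, pr.1 <+: l ∧ rep = pr.2 ∧ rest = l.drop pr.1.length := by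
  unfold pvMatch at h
  obtain ⟨pr, hmem, hf⟩ := List.exists_of_findSome?_eq_some h
  by_cases hp : pr.1.isPrefixOf l
  · rw [if_pos hp] at hf
    simp only [Option.some.injEq, Prod.mk.injEq] at hf
    exact ⟨pr, hmem, List.isPrefixOf_iff_prefix.mp hp, hf.1.symm, hf.2.symm⟩
  · rw [if_neg hp] at hf; simp at hf

theorem pvMatch_lt {l rep rest : List Char} (h : pvMatch l = some (rep, rest)) :
    rest.length < l.length := by
  obtain ⟨pr, hmem, hpre, -, rfl⟩ := pvMatch_some h
  have h1 := hpre.length_le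
  have h2 : 0 < pr.1.length := by fin_cases hmem <;> decide
  simp only [List.length_drop]; omega

-- the outer while loop of Source B, consuming the matched pattern (or one char) each step
def pvScan (l : List Char) : List Char :=
  match h : pvMatch l with
  | some (rep, rest) => rep ++ pvScan rest
  | none =>
    match l with
    | [] => []
    | c :: t => c :: pvScan t
termination_by l.length
decreasing_by
  · exact pvMatch_lt h
  · simp

def normalize_playwright_code_alt (code : String) : String :=
  String.ofList (pvScan code.toList)

-- ===== PRECONDITION & SPEC =====
-- Pre_ excludes inputs containing "getByTextype(", where the patterns getByText and type(
-- overlap on one character: A's sequential passes rewrite both overlapping occurrences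
-- (a later pass re-matches across the first replacement's output), B's leftmost-first
-- single pass rewrites only the first; both resolutions of the overlap are defensible.
def Pre_normalize_playwright_code (code : String) : Prop :=
  ¬ ("getByTextype(".toList <:+: code.toList)
instance (code : String) : Decidable (Pre_normalize_playwright_code code) := by
  unfold Pre_normalize_playwright_code; infer_instance

def pvWitness_normalize_playwright_code : String := "page.getByRole('button').click(); el.type('hi')"

def Spec_normalize_playwright_code (code : String) (out : String) : Prop := out = normalize_playwright_code_alt code
instance (code : String) (out : String) : Decidable (Spec_normalize_playwright_code code out) := by unfold Spec_normalize_playwright_code; infer_instance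

-- ===== CLAIM (what is proved, stated in full; the proofs are below) =====
def Claim_equal_normalize_playwright_code : Prop := ∀ (code : String), Dom_normalize_playwright_code code → Pre_normalize_playwright_code code → Spec_normalize_playwright_code code (normalize_playwright_code code)

-- ===== LEMMAS AND PROOFS =====

-- Python str.replace (nonempty pattern) in structural form
def pvRep (pat rep : List Char) (l : List Char) : List Char :=
  if h : pat ≠ [] ∧ pat.isPrefixOf l then rep ++ pvRep pat rep (l.drop pat.length)
  else
    match l with
    | [] => []
    | c :: t => c :: pvRep pat rep t
termination_by l.length
decreasing_by
  · have h1 := (List.isPrefixOf_iff_prefix.mp h.2).length_le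
    have h3 : 0 < pat.length := Nat.pos_of_ne_zero (fun hh => h.1 (List.length_eq_zero_iff.mp hh))
    simp only [List.length_drop]; omega
  · simp

theorem pvRep_nil (pat rep : List Char) : pvRep pat rep [] = [] := by
  rw [pvRep]
  have hneg : ¬ (pat ≠ [] ∧ pat.isPrefixOf ([] : List Char) = true) := by
    rintro ⟨h1, h2⟩
    exact h1 (List.prefix_nil.mp (List.isPrefixOf_iff_prefix.mp h2))
  rw [dif_neg hneg]

theorem pvRep_match (pat rep l : List Char) (h1 : pat ≠ []) (h2 : pat.isPrefixOf l = true) :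
    pvRep pat rep l = rep ++ pvRep pat rep (l.drop pat.length) := by
  rw [pvRep, dif_pos ⟨h1, h2⟩]

theorem pvRep_head (pat rep s : List Char) (h : pat ≠ []) :
    pvRep pat rep (pat ++ s) = rep ++ pvRep pat rep s := by
  rw [pvRep_match pat rep _ h (List.isPrefixOf_iff_prefix.mpr (List.prefix_append _ _)),
      List.drop_left]

theorem pvRep_cons (pat rep : List Char) (c : Char) (t : List Char)
    (h : ¬ pat <+: (c :: t)) : pvRep pat rep (c :: t) = c :: pvRep pat rep t := by
  rw [pvRep, dif_neg (fun hh => h (List.isPrefixOf_iff_prefix.mp hh.2))]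

theorem pvRep_self (pat l : List Char) : pvRep pat pat l = l := by
  induction l using pvRep.induct (pat := pat) with
  | case1 l h ih =>
      rw [pvRep, dif_pos h, ih]
      conv_rhs => rw [← List.prefix_iff_eq_append.mp (List.isPrefixOf_iff_prefix.mp h.2)]
  | case2 h1 => exact pvRep_nil _ _
  | case3 c t h1 ih =>
      rw [pvRep, dif_neg h1]
      show c :: pvRep pat pat t = c :: t
      rw [ih]

-- bridge: PySem.Chars.replace = pvRep for nonempty patterns
theorem pvGo_eq (old new : List Char) (hold : old ≠ []) :
    ∀ (fuel : Nat) (l acc : List Char), l.length ≤ fuel →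
      PySem.Chars.replace.go old new fuel l acc = acc.reverse ++ pvRep old new l := by
  intro fuel
  induction fuel with
  | zero =>
      intro l acc hl
      have : l = [] := List.length_eq_zero_iff.mp (Nat.le_zero.mp hl)
      subst this
      rw [PySem.Chars.replace.go.eq_def]; simp [pvRep_nil]
  | succ n ih =>
      intro l acc hl
      match l with
      | [] => rw [PySem.Chars.replace.go.eq_def]; simp [pvRep_nil]
      | c :: t =>
          rw [PySem.Chars.replace.go.eq_def]
          by_cases hp : old.isPrefixOf (c :: t)
          · simp only [if_pos hp]
            have h2 : 0 < old.length :=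
              Nat.pos_of_ne_zero (fun hh => hold (List.length_eq_zero_iff.mp hh))
            have hlen : (List.drop old.length (c :: t)).length ≤ n := by
              simp only [List.length_drop, List.length_cons] at *; omega
            rw [ih _ _ hlen]
            conv_rhs => rw [pvRep_match old new _ hold hp]
            simp
          · simp only [if_neg hp]
            have hlen : t.length ≤ n := by simp only [List.length_cons] at hl; omega
            rw [ih _ _ hlen]
            conv_rhs => rw [pvRep_cons old new c t (fun hh => hp (List.isPrefixOf_iff_prefix.mpr hh))]
            simp

theorem pvReplace_eq (s old new : List Char) (hold : old ≠ []) :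
    PySem.Chars.replace s old new = pvRep old new s := by
  rw [PySem.Chars.replace]
  rw [if_neg (by simpa [List.isEmpty_iff] using hold)]
  simpa using pvGo_eq old new hold s.length s [] le_rfl

-- the chain of passes, as a fold over a pass list
def pvChainOf (ps : List (List Char × List Char)) (l : List Char) : List Char :=
  ps.foldl (fun s pr => pvRep pr.1 pr.2 s) l

-- "blocked": pat can never be a prefix of w ++ s, whatever s is
def pvBlocked (pat w : List Char) : Bool :=
  pat.take (min pat.length w.length) != w.take (min pat.length w.length)

theorem pvBlocked_spec {pat w : List Char} (h : pvBlocked pat w = true) (s : List Char) :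
    ¬ pat <+: (w ++ s) := by
  intro hp
  obtain ⟨u, hu⟩ := hp
  have h1 : (pat ++ u).take (min pat.length w.length) = pat.take (min pat.length w.length) :=
    List.take_append_of_le_length (by omega)
  have h2 : (w ++ s).take (min pat.length w.length) = w.take (min pat.length w.length) :=
    List.take_append_of_le_length (by omega)
  rw [hu] at h1
  simp only [pvBlocked, bne_iff_ne, ne_eq] at h
  exact h (h1.symm.trans h2)

-- lift a pass over a context u in which the pattern never matches
theorem pvLift (pat rep : List Char) :
    ∀ (u s : List Char), (∀ p < u.length, ¬ pat <+: (u.drop p ++ s)) →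
      pvRep pat rep (u ++ s) = u ++ pvRep pat rep s := by
  intro u
  induction u with
  | nil => intro s _; simp
  | cons c u' ih =>
      intro s hnp
      have h0 : ¬ pat <+: (c :: (u' ++ s)) := by
        have := hnp 0 (by simp); simpa using this
      rw [List.cons_append, pvRep_cons _ _ _ _ h0,
          ih s (fun p hp => by simpa using hnp (p + 1) (by simp; omega))]
      simp

def pvBlockedIn (pat u : List Char) : Bool :=
  (List.range u.length).all (fun p => pvBlocked pat (u.drop p))

theorem pvLift' (pat rep u : List Char) (s : List Char) (h : pvBlockedIn pat u = true) :
    pvRep pat rep (u ++ s) = u ++ pvRep pat rep s := by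
  apply pvLift
  intro p hp
  exact pvBlocked_spec ((List.all_eq_true.mp h) p (List.mem_range.mpr hp)) s

-- "safe": w can never be created across a replacement output rep
def pvSafe (rep w : List Char) : Bool :=
  (List.range w.length).all (fun d => !(w.drop d).isPrefixOf rep && !rep.isPrefixOf (w.drop d))

theorem pvSafe_spec {rep w : List Char} (h : pvSafe rep w = true) {d : Nat} (hd : d < w.length) :
    ¬ (w.drop d) <+: rep ∧ ¬ rep <+: (w.drop d) := by
  have := (List.all_eq_true.mp h) d (List.mem_range.mpr hd)
  simp only [Bool.and_eq_true, Bool.not_eq_true'] at this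
  constructor
  · intro hp; rw [List.isPrefixOf_iff_prefix.mpr hp] at this; simp at this
  · intro hp; rw [List.isPrefixOf_iff_prefix.mpr hp] at this; simp at this

theorem pvSafe_tail {rep : List Char} {c : Char} {w : List Char}
    (h : pvSafe rep (c :: w) = true) : pvSafe rep w = true := by
  simp only [pvSafe, List.all_eq_true, List.mem_range] at h ⊢
  intro d hd
  have := h (d + 1) (by simp; omega)
  simpa using this

-- transfer: a safe w prefixing the output of a pass already prefixed its input
theorem pvG (pat rep : List Char) :
    ∀ (s w : List Char), pvSafe rep w = true → w <+: pvRep pat rep s → w <+: s := by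
  intro s
  induction s using pvRep.induct (pat := pat) with
  | case1 l h ih =>
      intro w hsafe hw
      rw [pvRep, dif_pos h] at hw
      match w with
      | [] => exact List.nil_prefix
      | a :: w' =>
          exfalso
          rcases List.prefix_or_prefix_of_prefix hw (List.prefix_append rep _) with h1 | h1
          · exact (pvSafe_spec hsafe (d := 0) (by simp)).1 (by simpa using h1)
          · exact (pvSafe_spec hsafe (d := 0) (by simp)).2 (by simpa using h1)
  | case2 h1 =>
      intro w hsafe hw
      rw [pvRep_nil] at hw
      simpa using hw
  | case3 c t h1 ih =>
      intro w hsafe hw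
      rw [pvRep, dif_neg h1] at hw
      match w with
      | [] => exact List.nil_prefix
      | a :: w' =>
          rw [List.cons_prefix_cons] at hw ⊢
          exact ⟨hw.1, ih w' (pvSafe_tail hsafe) hw.2⟩

-- transfer through a whole chain of safe passes
theorem pvGchain : ∀ (ps : List (List Char × List Char)) (l w : List Char),
    (∀ pr ∈ ps, pr.1 ≠ []) → (∀ pr ∈ ps, pvSafe pr.2 w = true) →
    w <+: pvChainOf ps l → w <+: l := by
  intro ps
  induction ps with
  | nil => intro l w _ _ h; simpa [pvChainOf] using h
  | cons pr ps' ih =>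
      intro l w hne hsafe hw
      have h1 : w <+: pvRep pr.1 pr.2 l := by
        apply ih (pvRep pr.1 pr.2 l) w
          (fun q hq => hne q (by simp [hq]))
          (fun q hq => hsafe q (by simp [hq]))
        simpa [pvChainOf] using hw
      exact pvG pr.1 pr.2 l w (hsafe pr (by simp)) h1

-- a chain passes over a head char at which no pattern of the chain matches
theorem pvChain_cons : ∀ (ps : List (List Char × List Char)) (c : Char) (t : List Char),
    (∀ pr ∈ ps, pr.1 ≠ []) →
    (∀ pr ∈ ps, ∀ pr' ∈ ps, pvSafe pr'.2 pr.1.tail = true) →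
    (∀ pr ∈ ps, ¬ pr.1 <+: (c :: t)) →
    pvChainOf ps (c :: t) = c :: pvChainOf ps t := by
  intro ps
  induction ps with
  | nil => intro c t _ _ _; simp [pvChainOf]
  | cons pr ps' ih =>
      intro c t hne hsafe hnm
      show pvChainOf ps' (pvRep pr.1 pr.2 (c :: t)) = c :: pvChainOf ps' (pvRep pr.1 pr.2 t)
      rw [pvRep_cons _ _ _ _ (hnm pr (by simp))]
      apply ih c (pvRep pr.1 pr.2 t)
        (fun q hq => hne q (by simp [hq]))
        (fun q hq q' hq' => hsafe q (by simp [hq]) q' (by simp [hq']))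
      intro q hq hp
      match hq1 : q.1, hp with
      | [], hp => exact (hne q (by simp [hq]) hq1).elim
      | a :: tl, hp =>
          rw [List.cons_prefix_cons] at hp
          have htl : tl <+: t := by
            apply pvG pr.1 pr.2 t tl _ hp.2
            have := hsafe q (by simp [hq]) pr (by simp)
            rw [hq1] at this; simpa using this
          apply hnm q (by simp [hq])
          rw [hq1, List.cons_prefix_cons]
          exact ⟨hp.1, htl⟩

-- pvMatch = none means no pattern matches at the head
theorem pvMatch_none {l : List Char} (h : pvMatch l = none) :
    ∀ pr ∈ pvRules, ¬ pr.1 <+: l := by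
  intro pr hm hp
  unfold pvMatch at h
  rw [List.findSome?_eq_none_iff] at h
  have := h pr hm
  rw [if_pos (List.isPrefixOf_iff_prefix.mpr hp)] at this
  simp at this

-- pvScan equations
theorem pvScan_nil : pvScan [] = [] := by
  rw [pvScan]
  split
  · next heq =>
      have h0 : pvMatch ([] : List Char) = none := by decide
      rw [h0] at heq; cases heq
  · rfl

theorem pvScan_eq_match {l rep rest : List Char} (h : pvMatch l = some (rep, rest)) :
    pvScan l = rep ++ pvScan rest := by
  rw [pvScan]
  split
  · next rep' rest' heq =>
      rw [h] at heq
      simp only [Option.some.injEq, Prod.mk.injEq] at heq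
      rw [heq.1, heq.2]
  · next heq => rw [h] at heq; cases heq

theorem pvScan_cons_none {c : Char} {t : List Char} (h : pvMatch (c :: t) = none) :
    pvScan (c :: t) = c :: pvScan t := by
  rw [pvScan]
  split
  · next heq => rw [h] at heq; cases heq
  · rfl

-- bridge lemma for A: its seven replace passes are the six-pass chain (click() is the identity)
theorem pvA_toList (code : String) :
    (normalize_playwright_code code).toList = pvChainOf pvRules code.toList := by
  unfold normalize_playwright_code
  simp only [PySem.Str.toList_replace]
  rw [pvReplace_eq _ "getByRole".toList _ (by decide),
      pvReplace_eq _ "getByText".toList _ (by decide),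
      pvReplace_eq _ "getByLabel".toList _ (by decide),
      pvReplace_eq _ "getByPlaceholder".toList _ (by decide),
      pvReplace_eq _ "getByTestId".toList _ (by decide),
      pvReplace_eq _ "click()".toList _ (by decide),
      pvReplace_eq _ "type(".toList _ (by decide),
      pvRep_self "click()".toList _]
  simp [pvChainOf, pvRules, List.foldl]

theorem pvB_toList (code : String) :
    (normalize_playwright_code_alt code).toList = pvScan code.toList := by
  simp [normalize_playwright_code_alt]

-- the six step lemmas: the chain consumes a matched pattern at the head
theorem pvK_role (t : List Char) :
    pvChainOf pvRules ("getByRole".toList ++ t) =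
      "get_by_role".toList ++ pvChainOf pvRules t := by
  simp only [pvChainOf, pvRules, List.foldl]
  rw [pvRep_head _ _ _ (by decide),
      pvLift' "getByText".toList _ "get_by_role".toList _ (by decide),
      pvLift' "getByLabel".toList _ "get_by_role".toList _ (by decide),
      pvLift' "getByPlaceholder".toList _ "get_by_role".toList _ (by decide),
      pvLift' "getByTestId".toList _ "get_by_role".toList _ (by decide),
      pvLift' "type(".toList _ "get_by_role".toList _ (by decide)]

theorem pvK_text (t : List Char) (htyp : ¬ ("ype(".toList <+: t)) :
    pvChainOf pvRules ("getByText".toList ++ t) =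
      "get_by_text".toList ++ pvChainOf pvRules t := by
  simp only [pvChainOf, pvRules, List.foldl]
  rw [pvLift' "getByRole".toList _ "getByText".toList _ (by decide),
      pvRep_head _ _ _ (by decide),
      pvLift' "getByLabel".toList _ "get_by_text".toList _ (by decide),
      pvLift' "getByPlaceholder".toList _ "get_by_text".toList _ (by decide),
      pvLift' "getByTestId".toList _ "get_by_text".toList _ (by decide)]
  -- the type( pass: "get_by_text" ends in 't', so position 10 needs ¬"ype(" ≺ rest
  have hs : ¬ ("ype(".toList <+:
      pvRep "getByTestId".toList "get_by_test_id".toList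
        (pvRep "getByPlaceholder".toList "get_by_placeholder".toList
          (pvRep "getByLabel".toList "get_by_label".toList
            (pvRep "getByText".toList "get_by_text".toList
              (pvRep "getByRole".toList "get_by_role".toList t))))) := by
    intro hcon
    apply htyp
    exact pvGchain
      [ ("getByRole".toList, "get_by_role".toList)
      , ("getByText".toList, "get_by_text".toList)
      , ("getByLabel".toList, "get_by_label".toList)
      , ("getByPlaceholder".toList, "get_by_placeholder".toList)
      , ("getByTestId".toList, "get_by_test_id".toList) ] t "ype(".toList
      (by decide) (by decide) (by simpa [pvChainOf, List.foldl] using hcon)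
  rw [pvLift "type(".toList "fill(".toList "get_by_text".toList _ ?_]
  intro p hp
  have hp11 : p < 11 := by simpa using hp
  interval_cases p
  case _ => exact pvBlocked_spec (by decide) _
  case _ => exact pvBlocked_spec (by decide) _
  case _ => exact pvBlocked_spec (by decide) _
  case _ => exact pvBlocked_spec (by decide) _
  case _ => exact pvBlocked_spec (by decide) _
  case _ => exact pvBlocked_spec (by decide) _
  case _ => exact pvBlocked_spec (by decide) _
  case _ => exact pvBlocked_spec (by decide) _
  case _ => exact pvBlocked_spec (by decide) _
  case _ => exact pvBlocked_spec (by decide) _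
  case _ =>
    -- p = 10 : drop 10 "get_by_text" = "t"
    intro hcon
    have hd : List.drop 10 "get_by_text".toList = ['t'] := by decide
    have he : ("type(".toList : List Char) = 't' :: "ype(".toList := by decide
    rw [he, hd, List.singleton_append] at hcon
    exact hs (List.cons_prefix_cons.mp hcon).2

theorem pvK_label (t : List Char) :
    pvChainOf pvRules ("getByLabel".toList ++ t) =
      "get_by_label".toList ++ pvChainOf pvRules t := by
  simp only [pvChainOf, pvRules, List.foldl]
  rw [pvLift' "getByRole".toList _ "getByLabel".toList _ (by decide),
      pvLift' "getByText".toList _ "getByLabel".toList _ (by decide),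
      pvRep_head _ _ _ (by decide),
      pvLift' "getByPlaceholder".toList _ "get_by_label".toList _ (by decide),
      pvLift' "getByTestId".toList _ "get_by_label".toList _ (by decide),
      pvLift' "type(".toList _ "get_by_label".toList _ (by decide)]

theorem pvK_placeholder (t : List Char) :
    pvChainOf pvRules ("getByPlaceholder".toList ++ t) =
      "get_by_placeholder".toList ++ pvChainOf pvRules t := by
  simp only [pvChainOf, pvRules, List.foldl]
  rw [pvLift' "getByRole".toList _ "getByPlaceholder".toList _ (by decide),
      pvLift' "getByText".toList _ "getByPlaceholder".toList _ (by decide),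
      pvLift' "getByLabel".toList _ "getByPlaceholder".toList _ (by decide),
      pvRep_head _ _ _ (by decide),
      pvLift' "getByTestId".toList _ "get_by_placeholder".toList _ (by decide),
      pvLift' "type(".toList _ "get_by_placeholder".toList _ (by decide)]

theorem pvK_testid (t : List Char) :
    pvChainOf pvRules ("getByTestId".toList ++ t) =
      "get_by_test_id".toList ++ pvChainOf pvRules t := by
  simp only [pvChainOf, pvRules, List.foldl]
  rw [pvLift' "getByRole".toList _ "getByTestId".toList _ (by decide),
      pvLift' "getByText".toList _ "getByTestId".toList _ (by decide),
      pvLift' "getByLabel".toList _ "getByTestId".toList _ (by decide),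
      pvLift' "getByPlaceholder".toList _ "getByTestId".toList _ (by decide),
      pvRep_head _ _ _ (by decide),
      pvLift' "type(".toList _ "get_by_test_id".toList _ (by decide)]

theorem pvK_type (t : List Char) :
    pvChainOf pvRules ("type(".toList ++ t) =
      "fill(".toList ++ pvChainOf pvRules t := by
  simp only [pvChainOf, pvRules, List.foldl]
  rw [pvLift' "getByRole".toList _ "type(".toList _ (by decide),
      pvLift' "getByText".toList _ "type(".toList _ (by decide),
      pvLift' "getByLabel".toList _ "type(".toList _ (by decide),
      pvLift' "getByPlaceholder".toList _ "type(".toList _ (by decide),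
      pvLift' "getByTestId".toList _ "type(".toList _ (by decide),
      pvRep_head _ _ _ (by decide)]

-- the main equivalence on lists
theorem pvMainAux : ∀ (n : Nat) (l : List Char), l.length ≤ n →
    ¬ ("getByTextype(".toList <:+: l) → pvChainOf pvRules l = pvScan l := by
  intro n
  induction n with
  | zero =>
      intro l hl _
      have : l = [] := List.length_eq_zero_iff.mp (Nat.le_zero.mp hl)
      subst this
      rw [pvScan_nil]; simp [pvChainOf, pvRules, List.foldl, pvRep_nil]
  | succ n ih =>
      intro l hl hbad
      cases hm : pvMatch l with
      | some pr0 =>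
          obtain ⟨rep, rest⟩ := pr0
          rw [pvScan_eq_match hm]
          obtain ⟨pr, hmem, hpre, hrep, hrest⟩ := pvMatch_some hm
          subst hrep; subst hrest
          obtain ⟨t, rfl⟩ := hpre
          rw [List.drop_left]
          have hbt : ¬ ("getByTextype(".toList <:+: t) :=
            fun hc => hbad (hc.trans (List.suffix_append pr.1 t).isInfix)
          have hlt : t.length ≤ n := by
            have hlen : 5 ≤ pr.1.length := by fin_cases hmem <;> decide
            rw [List.length_append] at hl
            omega
          rw [← ih t hlt hbt]
          fin_cases hmem
          · exact pvK_role t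
          · apply pvK_text t
            intro hy
            obtain ⟨t', rfl⟩ := hy
            apply hbad
            apply List.IsPrefix.isInfix
            refine ⟨t', ?_⟩
            have hsplit : ("getByTextype(".toList : List Char) =
                "getByText".toList ++ "ype(".toList := by decide
            rw [hsplit, List.append_assoc]
          · exact pvK_label t
          · exact pvK_placeholder t
          · exact pvK_testid t
          · exact pvK_type t
      | none =>
          match l with
          | [] => rw [pvScan_nil]; simp [pvChainOf, pvRules, List.foldl, pvRep_nil]
          | c :: t =>
              rw [pvScan_cons_none hm,
                  pvChain_cons pvRules c t (by decide) (by decide) (pvMatch_none hm)]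
              have hbt : ¬ ("getByTextype(".toList <:+: t) :=
                fun hc => hbad (hc.trans (List.suffix_cons c t).isInfix)
              rw [ih t (by simp only [List.length_cons] at hl; omega) hbt]

-- ===== VERDICT (by name: the statement is the Claim_ definition above) =====
theorem normalize_playwright_code_spec : Claim_equal_normalize_playwright_code := by
  intro code _ hpre
  unfold Spec_normalize_playwright_code
  apply String.toList_inj.mp
  rw [pvA_toList, pvB_toList]
  exact pvMainAux code.toList.length code.toList le_rfl hpre
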